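-- pv_equiv track=rewrite | github.com/ideven85/Machine_Learning_Algorithms | 6_101/Week5/refactory/practice.py | maximum_steps
-- ===== SOURCE A (Python) =====
-- def maximum_steps(part_manifest):
--     """
--     Recursively determine the maximum number of assembly steps it would take to assemble
--     a part in the manifest.
--
--     Parameters:
--         * part_manifest (dict<int, list<int>>) : a dictionary with integer part
--             numbers mapping to a list of sub-part numbers needed to assemble the part.
--             Each sub-part may or may not themselves be a key in the dictionary.
--
--     Returns:
--         An integer representing the maximum depth of the part_manifest.
--
--     >>> maximum_steps({1: [2, 3, 2, 3], 3: [2, 4, 5]})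
--     2
--     >>> maximum_steps({3: [2, 4, 5]})
--     1
--     >>> maximum_steps({2: [1], 4: [3, 2], 3: [2, 1]})
--     3
--     >>> maximum_steps({5: [1, 2], 3: [6,5,5,5,5], 7: [1,9], 10: [3,3,3,6]})
--     3
--     """
--
--     def max_helper(part_num):
--         """
--         Given a part_num (int), return the maximum number of assembly steps.
--         Base parts (parts that have no sub-parts) have 0 assembly steps.
--         """
--         if part_num not in part_manifest:
--             return 0
--         else:
--             for el in part_manifest[part_num]:
--                 if el in part_manifest:
--                     return 1 + max_helper(el)
--
--         return 0
--
--     max_depth = 0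
--     visited = set()
--     for el in part_manifest.keys():
--         current = 0
--         if el in part_manifest:
--
--             max_depth = max(max_helper(el), max_depth)
--
--     return 1 + max_depth
-- ===== SOURCE B (Python) =====
-- def maximum_steps(part_manifest):
--     cache = {}
--
--     def depth(part):
--         if part in cache:
--             return cache[part]
--         steps = 0
--         for sub in part_manifest[part]:
--             if sub in part_manifest:
--                 steps = 1 + depth(sub)
--                 break
--         cache[part] = steps
--         return steps
--
--     best = 0
--     for part in part_manifest:
--         best = max(best, depth(part))
--     return 1 + best
-- ===== Notes on version B (the rewrite author's own statement) =====
-- stated objective: alternative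
-- what changed: B memoizes the per-part depth in a dict cache threaded through the recursion, so each part's first-matching-sub-part chain is resolved once and reused, instead of A re-walking the chain from scratch for every key.
import Mathlib
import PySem

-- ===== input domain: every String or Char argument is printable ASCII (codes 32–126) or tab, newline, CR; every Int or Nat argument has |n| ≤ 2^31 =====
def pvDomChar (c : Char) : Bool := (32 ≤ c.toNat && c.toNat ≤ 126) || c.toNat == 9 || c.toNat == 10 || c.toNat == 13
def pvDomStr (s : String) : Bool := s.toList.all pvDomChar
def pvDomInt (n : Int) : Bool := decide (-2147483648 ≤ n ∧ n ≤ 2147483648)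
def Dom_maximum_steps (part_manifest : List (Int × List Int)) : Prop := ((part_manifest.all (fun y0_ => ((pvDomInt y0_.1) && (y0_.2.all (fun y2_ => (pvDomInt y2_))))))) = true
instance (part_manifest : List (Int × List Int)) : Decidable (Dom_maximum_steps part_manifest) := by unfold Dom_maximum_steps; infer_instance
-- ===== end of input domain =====

-- B memoizes the per-part depth in a dict cache (each first-matching-sub-part chain is walked once); objective: alternative.
-- Shared bridging helpers: the Python parameter is a dict, modelled as the PySem.Dict built
-- from the association list (later duplicate keys overwrite, as Python's dict() does).
def pvD (part_manifest : List (Int × List Int)) : PySem.Dict Int (List Int) :=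
  part_manifest.foldl (fun d kv => d.insert kv.1 kv.2) PySem.Dict.empty

def pvKeys (part_manifest : List (Int × List Int)) : List Int := (pvD part_manifest).keys

-- 'for el in part_manifest[p]: if el in part_manifest: …' — the first sub-part that is a key.
def pvNxt (part_manifest : List (Int × List Int)) (p : Int) : Option Int :=
  ((pvD part_manifest).getD p []).find? (fun e => ((pvD part_manifest).get? e).isSome)

-- ===== PORT A =====
-- max_helper; fuel (length+1) only makes the recursion total — under Pre_ it never runs out.
def pvMaxHelperA (part_manifest : List (Int × List Int)) : Nat → Int → Int
  | 0, _ => 0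
  | f + 1, part_num =>
    if ((pvD part_manifest).get? part_num).isSome then
      match pvNxt part_manifest part_num with
      | some el => 1 + pvMaxHelperA part_manifest f el
      | none => 0
    else 0

def maximum_steps (part_manifest : List (Int × List Int)) : Int :=
  1 + (pvKeys part_manifest).foldl
        (fun max_depth el =>
          if ((pvD part_manifest).get? el).isSome then
            max (pvMaxHelperA part_manifest (part_manifest.length + 1) el) max_depth
          else max_depth) 0

-- ===== PORT B =====
-- depth with a threaded cache dict; fuel (length+1) only makes the recursion total.
def pvDepthB (part_manifest : List (Int × List Int)) :
    Nat → Int → PySem.Dict Int Int → Int × PySem.Dict Int Int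
  | 0, _, cache => (0, cache)
  | f + 1, part, cache =>
    match cache.get? part with
    | some v => (v, cache)
    | none =>
      match pvNxt part_manifest part with
      | some sub =>
        let r := pvDepthB part_manifest f sub cache
        (1 + r.1, r.2.insert part (1 + r.1))
      | none => (0, cache.insert part 0)

def maximum_steps_alt (part_manifest : List (Int × List Int)) : Int :=
  1 + ((pvKeys part_manifest).foldl
        (fun st part =>
          let r := pvDepthB part_manifest (part_manifest.length + 1) part st.2
          (max st.1 r.1, r.2))
        ((0 : Int), PySem.Dict.empty)).1

-- ===== PRECONDITION & SPEC =====
-- Pre_ excludes manifests containing a cycle under 'first sub-part that is a key' (a nonempty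
-- set of keys closed under pvNxt): on exactly those inputs Python A raises RecursionError.
def Pre_maximum_steps (part_manifest : List (Int × List Int)) : Prop :=
  ∀ S ∈ (pvKeys part_manifest).sublists, S ≠ [] →
    ∃ x ∈ S, ∀ y ∈ S, pvNxt part_manifest x ≠ some y

instance (part_manifest : List (Int × List Int)) : Decidable (Pre_maximum_steps part_manifest) := by
  unfold Pre_maximum_steps; infer_instance

def pvWitness_maximum_steps : (List (Int × List Int)) := [(1, [2, 3]), (3, [2, 4, 5])]

def Spec_maximum_steps (part_manifest : List (Int × List Int)) (out : Int) : Prop := out = maximum_steps_alt part_manifest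
instance (part_manifest : List (Int × List Int)) (out : Int) : Decidable (Spec_maximum_steps part_manifest out) := by unfold Spec_maximum_steps; infer_instance

-- ===== CLAIM (what is proved, stated in full; the proofs are below) =====
def Claim_equal_maximum_steps : Prop := ∀ (part_manifest : List (Int × List Int)), Dom_maximum_steps part_manifest → Pre_maximum_steps part_manifest → Spec_maximum_steps part_manifest (maximum_steps part_manifest)

-- ===== LEMMAS AND PROOFS =====

theorem pv_keys_len (l : List (Int × List Int)) : (pvKeys l).length ≤ l.length := by
  have h : pvKeys l = PySem.Set.update PySem.Dict.empty.keys (l.map Prod.fst) :=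
    PySem.Dict.keys_foldl_insert_key l Prod.fst (fun d a => a.2) PySem.Dict.empty
  rw [h, PySem.Dict.keys_empty, PySem.Set.update_nil_left]
  calc (PySem.Set.ofList (l.map Prod.fst)).length ≤ (l.map Prod.fst).length :=
        PySem.Set.length_ofList_le _
    _ = l.length := List.length_map ..

theorem pv_memK (l : List (Int × List Int)) (k : Int) :
    ((pvD l).get? k).isSome = true ↔ k ∈ pvKeys l := by
  rw [← PySem.Dict.contains_eq_isSome_get? (pvD l) k]
  exact PySem.Dict.contains_iff_mem_keys (pvD l) k

theorem pv_nxt_mem (l : List (Int × List Int)) {k e : Int} (h : pvNxt l k = some e) :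
    e ∈ pvKeys l := by
  have := List.find?_some h
  exact (pv_memK l e).mp this

-- Under Pre_, a nxt-chain of keys can never return to a node it already contains.
theorem pv_no_cycle (l : List (Int × List Int)) (hpre : Pre_maximum_steps l)
    (P : List Int) (hne : P ≠ []) (hK : ∀ x ∈ P, x ∈ pvKeys l)
    (hch : List.IsChain (fun a b => pvNxt l a = some b) P)
    {e : Int} (hlast : pvNxt l (P.getLast hne) = some e) (he : e ∈ P) : False := by
  have hSmem : ∀ x, x ∈ (pvKeys l).filter (fun x => decide (x ∈ P)) ↔ x ∈ pvKeys l ∧ x ∈ P := by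
    intro x; simp [List.mem_filter]
  have hSsub : (pvKeys l).filter (fun x => decide (x ∈ P)) ∈ (pvKeys l).sublists :=
    List.mem_sublists.mpr List.filter_sublist
  have hSne : (pvKeys l).filter (fun x => decide (x ∈ P)) ≠ [] := by
    intro h0
    have hhd : P.head hne ∈ P := List.head_mem hne
    have : P.head hne ∈ (pvKeys l).filter (fun x => decide (x ∈ P)) :=
      (hSmem _).mpr ⟨hK _ hhd, hhd⟩
    rw [h0] at this; exact (List.not_mem_nil) this
  obtain ⟨x, hxS, hx⟩ := hpre _ hSsub hSne
  obtain ⟨hxK, hxP⟩ := (hSmem x).mp hxS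
  obtain ⟨i, hi, hxi⟩ := List.getElem_of_mem hxP
  by_cases hlt : i + 1 < P.length
  · have hstep := List.isChain_iff_getElem.mp hch i hlt
    have hmem : P[i + 1] ∈ P := List.getElem_mem _
    exact hx P[i + 1] ((hSmem _).mpr ⟨pv_nxt_mem l hstep, hmem⟩) (hxi ▸ hstep)
  · have hxl : x = P.getLast hne := by
      rw [← hxi, List.getLast_eq_getElem]
      congr 1; omega
    exact hx e ((hSmem e).mpr ⟨pv_nxt_mem l hlast, he⟩) (by rw [hxl]; exact hlast)

-- a Nodup path of keys avoiding a further key is shorter than the key list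
theorem pv_path_len (l : List (Int × List Int)) (P : List Int) (k : Int)
    (hk : k ∈ pvKeys l) (hnd : P.Nodup) (hK : ∀ x ∈ P, x ∈ pvKeys l) (hkP : k ∉ P) :
    P.length + 1 ≤ (pvKeys l).length := by
  have hnd' : (P ++ [k]).Nodup := by
    refine List.nodup_append.mpr ⟨hnd, List.nodup_singleton k, ?_⟩
    intro a ha b hb
    simp only [List.mem_singleton] at hb
    subst hb
    rintro rfl
    exact hkP ha
  have hsub : (P ++ [k]) ⊆ pvKeys l := by
    intro x hx
    rcases List.mem_append.mp hx with h | h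
    · exact hK x h
    · simp at h; exact h ▸ hk
  have := (hnd'.subperm hsub).length_le
  simpa using this

-- extending a chain path by one step keeps every invariant
theorem pv_step (l : List (Int × List Int)) (hpre : Pre_maximum_steps l)
    (P : List Int) (k e : Int) (hk : k ∈ pvKeys l) (hnd : P.Nodup)
    (hK : ∀ x ∈ P, x ∈ pvKeys l) (hch : List.IsChain (fun a b => pvNxt l a = some b) P)
    (hlink : ∀ h : P ≠ [], pvNxt l (P.getLast h) = some k) (hkP : k ∉ P)
    (hnxt : pvNxt l k = some e) :
    e ∈ pvKeys l ∧ (P ++ [k]).Nodup ∧ (∀ x ∈ P ++ [k], x ∈ pvKeys l) ∧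
      List.IsChain (fun a b => pvNxt l a = some b) (P ++ [k]) ∧
      (∀ h : P ++ [k] ≠ [], pvNxt l ((P ++ [k]).getLast h) = some e) ∧ e ∉ P ++ [k] := by
  have hne' : P ++ [k] ≠ [] := by simp
  have hnd' : (P ++ [k]).Nodup := by
    refine List.nodup_append.mpr ⟨hnd, List.nodup_singleton k, ?_⟩
    intro a ha b hb
    simp only [List.mem_singleton] at hb
    subst hb
    rintro rfl
    exact hkP ha
  have hK' : ∀ x ∈ P ++ [k], x ∈ pvKeys l := by
    intro x hx
    rcases List.mem_append.mp hx with h | h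
    · exact hK x h
    · simp at h; exact h ▸ hk
  have hch' : List.IsChain (fun a b => pvNxt l a = some b) (P ++ [k]) := by
    refine hch.append (by simp) ?_
    intro x hx y hy
    simp only [List.head?_cons, Option.mem_def, Option.some.injEq] at hy
    subst hy
    by_cases hPne : P = []
    · subst hPne; simp at hx
    · rw [List.getLast?_eq_some_getLast hPne] at hx
      simp only [Option.mem_def, Option.some.injEq] at hx
      subst hx
      exact hlink hPne
  have hlast' : (P ++ [k]).getLast hne' = k := by
    simp
  have hlink' : ∀ h : P ++ [k] ≠ [], pvNxt l ((P ++ [k]).getLast h) = some e := by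
    intro h; rw [hlast']; exact hnxt
  have heP' : e ∉ P ++ [k] := by
    intro hmem
    exact pv_no_cycle l hpre (P ++ [k]) hne' hK' hch' (hlink' hne') hmem
  exact ⟨pv_nxt_mem l hnxt, hnd', hK', hch', hlink', heP'⟩

-- A's helper is fuel-independent once the fuel covers the remaining keys
theorem pv_stabA (l : List (Int × List Int)) (hpre : Pre_maximum_steps l) :
    ∀ (f g : Nat) (P : List Int) (k : Int), k ∈ pvKeys l → P.Nodup →
      (∀ x ∈ P, x ∈ pvKeys l) → List.IsChain (fun a b => pvNxt l a = some b) P →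
      (∀ h : P ≠ [], pvNxt l (P.getLast h) = some k) → k ∉ P →
      (pvKeys l).length ≤ f + P.length → (pvKeys l).length ≤ g + P.length →
      pvMaxHelperA l f k = pvMaxHelperA l g k := by
  intro f
  induction f with
  | zero =>
    intro g P k hk hnd hK _ _ hkP hf _
    have := pv_path_len l P k hk hnd hK hkP
    omega
  | succ f ih =>
    intro g P k hk hnd hK hch hlink hkP hf hg
    rcases g with _ | g
    · have := pv_path_len l P k hk hnd hK hkP
      omega
    rcases hn : pvNxt l k with _ | e
    · simp [pvMaxHelperA, hn]
    simp only [pvMaxHelperA, if_pos ((pv_memK l k).mpr hk), hn]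
    obtain ⟨heK, hnd', hK', hch', hlink', heP'⟩ := pv_step l hpre P k e hk hnd hK hch hlink hkP hn
    have := ih g (P ++ [k]) e heK hnd' hK' hch' hlink' heP'
      (by simp only [List.length_append, List.length_cons, List.length_nil]; omega)
      (by simp only [List.length_append, List.length_cons, List.length_nil]; omega)
    rw [this]

theorem pv_Dk_stable (l : List (Int × List Int)) (hpre : Pre_maximum_steps l)
    (k : Int) (hk : k ∈ pvKeys l) (f : Nat) (hf : (pvKeys l).length ≤ f) :
    pvMaxHelperA l f k = pvMaxHelperA l (l.length + 1) k := by
  have hlen := pv_keys_len l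
  refine pv_stabA l hpre f (l.length + 1) [] k hk (by simp) (by simp) (by simp)
    (fun h => absurd rfl h) (by simp) (by simpa using hf) (by simp; omega)

theorem pv_Dk_none (l : List (Int × List Int)) (k : Int) (hn : pvNxt l k = none) :
    pvMaxHelperA l (l.length + 1) k = 0 := by
  simp [pvMaxHelperA, hn]

theorem pv_helperA_succ (l : List (Int × List Int)) (f : Nat) (k : Int) :
    pvMaxHelperA l (f + 1) k =
      if ((pvD l).get? k).isSome then
        (match pvNxt l k with
          | some e => 1 + pvMaxHelperA l f e
          | none => 0)
      else 0 := rfl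

theorem pv_Dk_some (l : List (Int × List Int)) (hpre : Pre_maximum_steps l)
    (k e : Int) (hk : k ∈ pvKeys l) (hn : pvNxt l k = some e) :
    pvMaxHelperA l (l.length + 1) k = 1 + pvMaxHelperA l (l.length + 1) e := by
  have heK := pv_nxt_mem l hn
  have hs := pv_Dk_stable l hpre e heK l.length (pv_keys_len l)
  rw [pv_helperA_succ, if_pos ((pv_memK l k).mpr hk), hn]
  show 1 + pvMaxHelperA l l.length e = 1 + pvMaxHelperA l (l.length + 1) e
  rw [hs]

-- the cache only ever holds correct depths
def pvGood (l : List (Int × List Int)) (c : PySem.Dict Int Int) : Prop :=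
  ∀ p v, c.get? p = some v → v = pvMaxHelperA l (l.length + 1) p

theorem pv_Bcorr (l : List (Int × List Int)) (hpre : Pre_maximum_steps l) :
    ∀ (f : Nat) (P : List Int) (k : Int) (c : PySem.Dict Int Int), pvGood l c →
      k ∈ pvKeys l → P.Nodup → (∀ x ∈ P, x ∈ pvKeys l) →
      List.IsChain (fun a b => pvNxt l a = some b) P →
      (∀ h : P ≠ [], pvNxt l (P.getLast h) = some k) → k ∉ P →
      (pvKeys l).length ≤ f + P.length →
      (pvDepthB l f k c).1 = pvMaxHelperA l (l.length + 1) k ∧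
        pvGood l (pvDepthB l f k c).2 := by
  intro f
  induction f with
  | zero =>
    intro P k c _ hk hnd hK _ _ hkP hf
    have := pv_path_len l P k hk hnd hK hkP
    omega
  | succ f ih =>
    intro P k c hgood hk hnd hK hch hlink hkP hf
    rcases hc : c.get? k with _ | v
    · rcases hn : pvNxt l k with _ | s
      · refine ⟨?_, ?_⟩
        · simp only [pvDepthB, hc, hn]
          exact (pv_Dk_none l k hn).symm
        · simp only [pvDepthB, hc, hn]
          intro p v hpv
          rw [PySem.Dict.get?_insert] at hpv
          split at hpv
          · rename_i hpk
            cases hpv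
            rw [hpk, pv_Dk_none l k hn]
          · exact hgood p v hpv
      · obtain ⟨hsK, hnd', hK', hch', hlink', hsP'⟩ :=
          pv_step l hpre P k s hk hnd hK hch hlink hkP hn
        obtain ⟨h1, h2⟩ := ih (P ++ [k]) s c hgood hsK hnd' hK' hch' hlink' hsP'
          (by simp only [List.length_append, List.length_cons, List.length_nil]; omega)
        refine ⟨?_, ?_⟩
        · simp only [pvDepthB, hc, hn]
          rw [h1, pv_Dk_some l hpre k s hk hn]
        · simp only [pvDepthB, hc, hn]
          intro p v hpv
          rw [PySem.Dict.get?_insert] at hpv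
          split at hpv
          · rename_i hpk
            cases hpv
            rw [hpk, pv_Dk_some l hpre k s hk hn, h1]
          · exact h2 p v hpv
    · refine ⟨?_, ?_⟩
      · simp only [pvDepthB, hc]
        exact hgood k v hc
      · simp only [pvDepthB, hc]
        exact hgood

-- the two outer loops agree, given a correct cache
theorem pv_foldEq (l : List (Int × List Int)) (hpre : Pre_maximum_steps l) :
    ∀ (els : List Int), (∀ e ∈ els, e ∈ pvKeys l) → ∀ (m : Int) (c : PySem.Dict Int Int),
      pvGood l c →
      (els.foldl (fun st part =>
          let r := pvDepthB l (l.length + 1) part st.2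
          (max st.1 r.1, r.2)) (m, c)).1
        = els.foldl (fun max_depth el =>
            if ((pvD l).get? el).isSome then
              max (pvMaxHelperA l (l.length + 1) el) max_depth
            else max_depth) m := by
  intro els
  induction els with
  | nil => intro _ m c _; rfl
  | cons e es ih =>
    intro hmem m c hgood
    have heK : e ∈ pvKeys l := hmem e List.mem_cons_self
    obtain ⟨h1, h2⟩ := pv_Bcorr l hpre (l.length + 1) [] e c hgood heK (by simp) (by simp)
      (by simp) (fun h => absurd rfl h) (by simp)
      (by simpa using Nat.le_trans (pv_keys_len l) (by omega))
    simp only [List.foldl_cons, if_pos ((pv_memK l e).mpr heK)]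
    rw [show (let r := pvDepthB l (l.length + 1) e c; (max m r.1, r.2))
        = (max m (pvDepthB l (l.length + 1) e c).1, (pvDepthB l (l.length + 1) e c).2) from rfl]
    rw [h1, max_comm m (pvMaxHelperA l (l.length + 1) e)]
    exact ih (fun x hx => hmem x (List.mem_cons_of_mem e hx)) _ _ h2

-- ===== VERDICT (by name: the statement is the Claim_ definition above) =====
theorem maximum_steps_spec : Claim_equal_maximum_steps := by
  intro l _ hpre
  show maximum_steps l = maximum_steps_alt l
  unfold maximum_steps maximum_steps_alt
  have hempty : pvGood l PySem.Dict.empty := by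
    intro p v hpv
    rw [PySem.Dict.get?_empty] at hpv
    cases hpv
  rw [← pv_foldEq l hpre (pvKeys l) (fun _ h => h) 0 PySem.Dict.empty hempty]
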